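-- pv_equiv track=rewrite | github.com/Rangga2077/OCR_Project | test_API_local.py | ocr_normalize
-- ===== SOURCE A (Python) =====
-- def ocr_normalize(text):
--     text = text.strip().replace(" ", "").replace("-", "")
--     replacements = {
--         "O": "0",
--         "o": "0",
--         "I": "1",
--         "l": "1",
--         "S": "5",
--         "s": "5",
--         "B": "8",
--         "G": "6",
--     }
--
--     for old, new in replacements.items():
--         text = text.replace(old, new)
--
--     return text
-- ===== SOURCE B (Python) =====
-- def ocr_normalize(text):
--     mapping = {
--         "O": "0",
--         "o": "0",
--         "I": "1",
--         "l": "1",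
--         "S": "5",
--         "s": "5",
--         "B": "8",
--         "G": "6",
--     }
--     out = []
--     for ch in text.strip():
--         if ch != " " and ch != "-":
--             out.append(mapping.get(ch, ch))
--     return "".join(out)
-- ===== Notes on version B (the rewrite author's own statement) =====
-- stated objective: simpler
-- what changed: Replaces the ten whole-string scans (strip, two deleting replaces, eight rule replaces) by a single pass over the stripped string that drops space and hyphen characters and maps each remaining character through the replacement dict once.
import Mathlib
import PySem

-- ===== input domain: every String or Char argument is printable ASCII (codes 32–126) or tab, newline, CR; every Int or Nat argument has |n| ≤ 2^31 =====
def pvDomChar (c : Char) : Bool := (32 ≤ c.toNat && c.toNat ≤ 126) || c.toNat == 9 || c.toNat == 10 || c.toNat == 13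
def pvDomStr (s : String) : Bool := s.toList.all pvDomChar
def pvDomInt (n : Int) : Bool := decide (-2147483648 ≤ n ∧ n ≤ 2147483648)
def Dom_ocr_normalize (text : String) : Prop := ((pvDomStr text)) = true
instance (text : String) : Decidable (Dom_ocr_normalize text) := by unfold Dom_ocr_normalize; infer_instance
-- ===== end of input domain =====

-- B replaces A's ten whole-string scans (strip + 2 deleting replaces + 8 rule replaces) by one
-- pass over the stripped string (objective: simpler); return values are identical.

-- ===== PORT A =====
def ocr_normalize (text : String) : String :=
  let text1 := PySem.Str.replace (PySem.Str.replace (PySem.Str.strip text) " " "") "-" ""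
  let replacements : PySem.Dict String String :=
    ((((((((PySem.Dict.empty).insert "O" "0").insert "o" "0").insert "I" "1").insert "l" "1").insert
        "S" "5").insert "s" "5").insert "B" "8").insert "G" "6"
  replacements.items.foldl (fun t p => PySem.Str.replace t p.1 p.2) text1

-- ===== PORT B =====
-- B's dict maps single characters to single characters; ported with Char keys/values.
def ocrMapping : PySem.Dict Char Char :=
  ((((((((PySem.Dict.empty).insert 'O' '0').insert 'o' '0').insert 'I' '1').insert 'l' '1').insert
      'S' '5').insert 's' '5').insert 'B' '8').insert 'G' '6'

def ocr_normalize_alt (text : String) : String :=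
  let out := (PySem.Str.strip text).toList.foldl
    (fun acc ch => if ch ≠ ' ' ∧ ch ≠ '-' then acc ++ [ocrMapping.getD ch ch] else acc) []
  String.ofList out

-- ===== PRECONDITION & SPEC =====
def Spec_ocr_normalize (text : String) (out : String) : Prop := out = ocr_normalize_alt text
instance (text : String) (out : String) : Decidable (Spec_ocr_normalize text out) := by unfold Spec_ocr_normalize; infer_instance

-- ===== CLAIM (what is proved, stated in full; the proofs are below) =====
def Claim_equal_ocr_normalize : Prop := ∀ (text : String), Dom_ocr_normalize text → Spec_ocr_normalize text (ocr_normalize text)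

-- ===== LEMMAS AND PROOFS =====

-- replace with a single-character pattern is an elementwise flatMap
lemma replace_go_single (a : Char) (new : List Char) :
    ∀ (fuel : Nat) (l acc : List Char), l.length ≤ fuel →
      PySem.Chars.replace.go [a] new fuel l acc
        = acc.reverse ++ l.flatMap (fun c => if c = a then new else [c]) := by
  intro fuel
  induction fuel with
  | zero =>
    intro l acc h
    have : l = [] := List.eq_nil_of_length_eq_zero (Nat.le_zero.mp h)
    subst this; simp [PySem.Chars.replace.go]
  | succ n ih =>
    intro l acc h
    cases l with
    | nil => simp [PySem.Chars.replace.go]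
    | cons c t =>
      rw [PySem.Chars.replace.go]
      simp only [List.length_cons, Nat.add_le_add_iff_right] at h
      by_cases hc : c = a
      · subst hc
        simp only [List.isPrefixOf, BEq.refl, Bool.and_true, if_true,
          List.length_cons, List.drop_succ_cons, List.length_nil, List.drop_zero]
        rw [ih t _ h]
        simp
      · have hp : [a].isPrefixOf (c :: t) = false := by
          simp [List.isPrefixOf]; exact fun h' => absurd h'.symm hc
        rw [hp]
        simp only [Bool.false_eq_true, if_false]
        rw [ih t _ h]
        simp [hc]

lemma replace_single (a : Char) (new l : List Char) :
    PySem.Chars.replace l [a] new = l.flatMap (fun c => if c = a then new else [c]) := by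
  rw [PySem.Chars.replace]
  simp only [List.isEmpty_cons, Bool.false_eq_true, if_false]
  exact (replace_go_single a new l.length l [] le_rfl).trans (by simp)

-- the composite of A's ten elementwise passes, at a single character
lemma composite_char (c : Char) :
    ((if c = ' ' then [] else [c]).flatMap (fun x =>
      (if x = '-' then [] else [x]).flatMap (fun x =>
       (if x = 'O' then ['0'] else [x]).flatMap (fun x =>
        (if x = 'o' then ['0'] else [x]).flatMap (fun x =>
         (if x = 'I' then ['1'] else [x]).flatMap (fun x =>
          (if x = 'l' then ['1'] else [x]).flatMap (fun x =>
           (if x = 'S' then ['5'] else [x]).flatMap (fun x =>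
            (if x = 's' then ['5'] else [x]).flatMap (fun x =>
             (if x = 'B' then ['8'] else [x]).flatMap (fun x =>
              if x = 'G' then ['6'] else [x])))))))))) 
      = if c = ' ' ∨ c = '-' then [] else [ocrMapping.getD c c] := by
  by_cases h1 : c = ' '; · subst h1; decide
  by_cases h2 : c = '-'; · subst h2; decide
  by_cases h3 : c = 'O'; · subst h3; decide
  by_cases h4 : c = 'o'; · subst h4; decide
  by_cases h5 : c = 'I'; · subst h5; decide
  by_cases h6 : c = 'l'; · subst h6; decide
  by_cases h7 : c = 'S'; · subst h7; decide
  by_cases h8 : c = 's'; · subst h8; decide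
  by_cases h9 : c = 'B'; · subst h9; decide
  by_cases h10 : c = 'G'; · subst h10; decide
  simp [h1, h2, h3, h4, h5, h6, h7, h8, h9, h10, ocrMapping, PySem.Dict.getD_insert]

lemma flatMap_filter_map (l : List Char) :
    (l.flatMap (fun c => if c = ' ' ∨ c = '-' then [] else [ocrMapping.getD c c]))
      = (l.filter (fun c => decide (c ≠ ' ' ∧ c ≠ '-'))).map (fun c => ocrMapping.getD c c) := by
  induction l with
  | nil => rfl
  | cons c t ih =>
    by_cases h : c = ' ' ∨ c = '-'
    · have hb : (!decide (c = ' ') && !decide (c = '-')) = false := by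
        rcases h with h | h <;> simp [h]
      simp [List.flatMap_cons, h, hb, ih]
    · push Not at h
      simp [List.flatMap_cons, h.1, h.2, ih]

lemma foldl_b (l : List Char) (acc : List Char) :
    l.foldl (fun acc ch => if ch ≠ ' ' ∧ ch ≠ '-' then acc ++ [ocrMapping.getD ch ch] else acc) acc
      = acc ++ (l.filter (fun c => decide (c ≠ ' ' ∧ c ≠ '-'))).map (fun c => ocrMapping.getD c c) := by
  induction l generalizing acc with
  | nil => simp
  | cons c t ih =>
    by_cases h : c ≠ ' ' ∧ c ≠ '-' <;> simp [List.foldl_cons, ih, h]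

-- ===== VERDICT (by name: the statement is the Claim_ definition above) =====
set_option maxHeartbeats 1000000 in
theorem ocr_normalize_spec : Claim_equal_ocr_normalize := by
  intro text _
  unfold Spec_ocr_normalize ocr_normalize_alt
  rw [foldl_b]
  show List.foldl _ _ _ = _
  rw [show (((((((((PySem.Dict.empty : PySem.Dict String String).insert "O" "0").insert "o" "0").insert "I" "1").insert "l" "1").insert
        "S" "5").insert "s" "5").insert "B" "8").insert "G" "6").items
      = [("O","0"),("o","0"),("I","1"),("l","1"),("S","5"),("s","5"),("B","8"),("G","6")] from by decide]
  simp only [List.foldl_cons, List.foldl_nil]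
  simp only [PySem.Str.replace, PySem.Str.strip, String.toList_ofList,
    show (" " : String).toList = [' '] from rfl, show ("-" : String).toList = ['-'] from rfl,
    show ("" : String).toList = [] from rfl,
    show ("O" : String).toList = ['O'] from rfl, show ("0" : String).toList = ['0'] from rfl,
    show ("o" : String).toList = ['o'] from rfl, show ("I" : String).toList = ['I'] from rfl,
    show ("1" : String).toList = ['1'] from rfl, show ("l" : String).toList = ['l'] from rfl,
    show ("S" : String).toList = ['S'] from rfl, show ("5" : String).toList = ['5'] from rfl,
    show ("s" : String).toList = ['s'] from rfl, show ("B" : String).toList = ['B'] from rfl,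
    show ("8" : String).toList = ['8'] from rfl, show ("G" : String).toList = ['G'] from rfl,
    show ("6" : String).toList = ['6'] from rfl]
  simp only [replace_single, List.flatMap_assoc]
  simp only [composite_char, flatMap_filter_map, List.nil_append]
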